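-- pv_equiv track=rewrite | github.com/makwana8399/Personalized-AI-Knowledge-Digest-Platform | ai-knowledge-digest/app/digest/generator.py | normalize_topic
-- ===== SOURCE A (Python) =====
-- CANONICAL_TOPICS = {
--     "ai": ["ai", "artificial intelligence", "llm", "llms", "chatgpt"],
--     "mlops": ["mlops", "devops", "cloud", "infrastructure"],
--     "startup": ["startup", "startups", "business", "founder", "saas"],
--     "product": ["product", "pm", "ux", "design"],
--     "vc": ["vc", "investment", "funding"],
--     "general": [],
-- }
--
-- def normalize_topic(raw_topic: str) -> str:
--     if not raw_topic:
--         return "general"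
--
--     raw = raw_topic.lower()
--
--     for canonical, variants in CANONICAL_TOPICS.items():
--         if raw == canonical or raw in variants:
--             return canonical
--
--     return "general"
-- ===== SOURCE B (Python) =====
-- TOPIC_LOOKUP = {
--     "ai": "ai",
--     "artificial intelligence": "ai",
--     "llm": "ai",
--     "llms": "ai",
--     "chatgpt": "ai",
--     "mlops": "mlops",
--     "devops": "mlops",
--     "cloud": "mlops",
--     "infrastructure": "mlops",
--     "startup": "startup",
--     "startups": "startup",
--     "business": "startup",
--     "founder": "startup",
--     "saas": "startup",
--     "product": "product",
--     "pm": "product",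
--     "ux": "product",
--     "design": "product",
--     "vc": "vc",
--     "investment": "vc",
--     "funding": "vc",
--     "general": "general",
-- }
--
-- def normalize_topic(raw_topic: str) -> str:
--     if not raw_topic:
--         return "general"
--     return TOPIC_LOOKUP.get(raw_topic.lower(), "general")
-- ===== Notes on version B (the rewrite author's own statement) =====
-- stated objective: idiomatic
-- what changed: Replaced the loop over CANONICAL_TOPICS with a single get on a precomputed flat reverse-lookup dict mapping every variant and canonical key directly to its canonical topic.
import Mathlib
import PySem

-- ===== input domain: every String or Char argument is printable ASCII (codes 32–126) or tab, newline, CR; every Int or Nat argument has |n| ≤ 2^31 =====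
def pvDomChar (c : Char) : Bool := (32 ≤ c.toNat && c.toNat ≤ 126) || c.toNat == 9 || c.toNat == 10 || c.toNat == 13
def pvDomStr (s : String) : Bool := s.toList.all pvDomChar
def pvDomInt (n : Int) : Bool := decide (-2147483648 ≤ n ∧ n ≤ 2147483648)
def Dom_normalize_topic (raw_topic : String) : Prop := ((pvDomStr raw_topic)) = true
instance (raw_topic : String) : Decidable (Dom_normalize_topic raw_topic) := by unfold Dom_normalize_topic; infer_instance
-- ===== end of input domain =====

-- B replaces A's scan over categories by one lookup in a precomputed flat reverse dict (idiomatic).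

-- ===== PORT A =====
def CANONICAL_TOPICS : List (String × List String) :=
  [ ("ai", ["ai", "artificial intelligence", "llm", "llms", "chatgpt"]),
    ("mlops", ["mlops", "devops", "cloud", "infrastructure"]),
    ("startup", ["startup", "startups", "business", "founder", "saas"]),
    ("product", ["product", "pm", "ux", "design"]),
    ("vc", ["vc", "investment", "funding"]),
    ("general", []) ]

-- the 'for canonical, variants in CANONICAL_TOPICS.items(): …' loop with early return
def normalizeLoop (raw : String) : List (String × List String) → String
  | [] => "general"
  | (canonical, variants) :: rest =>
      if raw = canonical ∨ raw ∈ variants then canonical else normalizeLoop raw rest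

def normalize_topic (raw_topic : String) : String :=
  if raw_topic = "" then "general"
  else normalizeLoop (PySem.Str.lower raw_topic) CANONICAL_TOPICS

-- ===== PORT B =====
def TOPIC_LOOKUP : PySem.Dict String String := PySem.Dict.ofList
  [ ("ai", "ai"), ("artificial intelligence", "ai"), ("llm", "ai"), ("llms", "ai"), ("chatgpt", "ai"),
    ("mlops", "mlops"), ("devops", "mlops"), ("cloud", "mlops"), ("infrastructure", "mlops"),
    ("startup", "startup"), ("startups", "startup"), ("business", "startup"), ("founder", "startup"), ("saas", "startup"),
    ("product", "product"), ("pm", "product"), ("ux", "product"), ("design", "product"),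
    ("vc", "vc"), ("investment", "vc"), ("funding", "vc"),
    ("general", "general") ]

def normalize_topic_alt (raw_topic : String) : String :=
  if raw_topic = "" then "general"
  else PySem.Dict.getD TOPIC_LOOKUP (PySem.Str.lower raw_topic) "general"

-- ===== PRECONDITION & SPEC =====
def Spec_normalize_topic (raw_topic : String) (out : String) : Prop := out = normalize_topic_alt raw_topic
instance (raw_topic : String) (out : String) : Decidable (Spec_normalize_topic raw_topic out) := by unfold Spec_normalize_topic; infer_instance

-- ===== CLAIM (what is proved, stated in full; the proofs are below) =====
def Claim_equal_normalize_topic : Prop := ∀ (raw_topic : String), Dom_normalize_topic raw_topic → Spec_normalize_topic raw_topic (normalize_topic raw_topic)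

-- ===== LEMMAS AND PROOFS =====
-- the two decision procedures agree on EVERY lowered string
theorem topic_lookup_items : TOPIC_LOOKUP.items =
  [ ("ai", "ai"), ("artificial intelligence", "ai"), ("llm", "ai"), ("llms", "ai"), ("chatgpt", "ai"),
    ("mlops", "mlops"), ("devops", "mlops"), ("cloud", "mlops"), ("infrastructure", "mlops"),
    ("startup", "startup"), ("startups", "startup"), ("business", "startup"), ("founder", "startup"), ("saas", "startup"),
    ("product", "product"), ("pm", "product"), ("ux", "product"), ("design", "product"),
    ("vc", "vc"), ("investment", "vc"), ("funding", "vc"),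
    ("general", "general") ] := by decide

theorem loop_eq_lookup (s : String) :
    normalizeLoop s CANONICAL_TOPICS = PySem.Dict.getD TOPIC_LOOKUP s "general" := by
  simp only [normalizeLoop, CANONICAL_TOPICS, PySem.Dict.getD, PySem.Dict.get?,
    topic_lookup_items, List.find?, List.mem_cons, List.not_mem_nil]
  split_ifs with h1 h2 h3 h4 h5 h6
  · rcases h1 with rfl | rfl | rfl | rfl | rfl | rfl | h0 <;> first | exact h0.elim | decide
  · rcases h2 with rfl | rfl | rfl | rfl | rfl | h0 <;> first | exact h0.elim | decide
  · rcases h3 with rfl | rfl | rfl | rfl | rfl | rfl | h0 <;> first | exact h0.elim | decide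
  · rcases h4 with rfl | rfl | rfl | rfl | rfl | h0 <;> first | exact h0.elim | decide
  · rcases h5 with rfl | rfl | rfl | rfl | h0 <;> first | exact h0.elim | decide
  · rcases h6 with rfl | h0
    · decide
    · exact h0.elim
  · simp_all [beq_eq_decide, eq_comm]

-- ===== VERDICT (by name: the statement is the Claim_ definition above) =====
theorem normalize_topic_spec : Claim_equal_normalize_topic := by
  intro raw_topic _
  unfold Spec_normalize_topic normalize_topic normalize_topic_alt
  split_ifs with h
  · rfl
  · exact loop_eq_lookup _
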